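-- pv_equiv track=rewrite | github.com/ryan-gang/Competitive-Programming | Leetcode/Reduce_Array_Size_to_The_Half.py | minSetSizeBetter
-- ===== SOURCE A (Python) =====
-- from collections import Counter
-- from typing import List
--
-- def minSetSizeBetter(arr: List[int]) -> int:
--     n = len(arr)
--     cnt = Counter(arr)
--
--     # Counting sort.
--     # Sorts in O(N) time, but O(N) space requirement.
--     counting = [0] * (n + 1)
--     for freq in cnt.values():
--         counting[freq] += 1
--
--     ans, removed, half, freq = 0, 0, n // 2, n
--     while removed < half:
--         ans += 1
--         while counting[freq] == 0:
--             freq -= 1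
--         removed += freq
--         counting[freq] -= 1
--     return ans
-- ===== SOURCE B (Python) =====
-- from collections import Counter
-- from typing import List
--
-- def minSetSizeBetter(arr: List[int]) -> int:
--     cnt = Counter(arr)
--     freqs = sorted(cnt.values(), reverse=True)
--     removed, ans, half = 0, 0, len(arr) // 2
--     for f in freqs:
--         if removed >= half:
--             break
--         removed += f
--         ans += 1
--     return ans
-- ===== Notes on version B (the rewrite author's own statement) =====
-- stated objective: simpler
-- what changed: Replaces the hand-written counting-sort array and nested while-loop maximum extraction with sorting the Counter's frequencies in descending order and a single greedy for-loop.
import Mathlib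
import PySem

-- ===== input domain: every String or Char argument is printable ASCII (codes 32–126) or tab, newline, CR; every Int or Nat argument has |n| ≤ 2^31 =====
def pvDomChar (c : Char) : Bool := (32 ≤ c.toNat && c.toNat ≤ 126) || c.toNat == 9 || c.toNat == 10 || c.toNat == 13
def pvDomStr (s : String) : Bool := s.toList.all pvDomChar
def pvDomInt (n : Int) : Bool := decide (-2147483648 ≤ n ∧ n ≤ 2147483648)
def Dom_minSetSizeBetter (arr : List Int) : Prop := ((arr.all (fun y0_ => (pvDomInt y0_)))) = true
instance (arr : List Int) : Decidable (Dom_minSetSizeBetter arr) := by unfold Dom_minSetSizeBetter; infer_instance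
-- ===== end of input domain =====

-- B replaces A's counting-sort array and nested while-loop maximum extraction by sorting the
-- Counter's frequencies descending and one greedy pass (same return value; no speed claim).

-- ===== PORT A =====
-- inner 'while counting[freq] == 0: freq -= 1': freq stays ≥ 0 on every reachable state
-- (counting[0] = 0 is never hit while entries remain), so structural recursion on freq is exact.
def findIdxA (c : List Int) : Nat → Nat
  | 0 => 0
  | f + 1 => if PySem.List.pyGetD c ((f + 1 : Nat) : Int) 0 = 0 then findIdxA c f else f + 1

-- outer 'while removed < half': each iteration adds a frequency ≥ 1 to removed and half ≤ n,
-- so n+1 units of fuel are provably enough (used with fuel = n+1 below).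
def loopA (c : List Int) (ans removed half : Int) (freq : Nat) : Nat → Int
  | 0 => ans
  | fuel + 1 =>
    if removed < half then
      let f := findIdxA c freq
      loopA (PySem.List.pySetD c (f : Int) (PySem.List.pyGetD c (f : Int) 0 - 1))
        (ans + 1) (removed + (f : Int)) half f fuel
    else ans

def minSetSizeBetter (arr : List Int) : Int :=
  let n := arr.length
  let cnt := PySem.Dict.counter arr
  let counting := cnt.values.foldl
    (fun c freq => PySem.List.pySetD c freq (PySem.List.pyGetD c freq 0 + 1))
    (List.replicate (n + 1) (0 : Int))
  loopA counting 0 0 (PySem.Int.floordiv (n : Int) 2) n (n + 1)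

-- ===== PORT B =====
def loopB (freqs : List Int) (removed ans half : Int) : Int :=
  match freqs with
  | [] => ans
  | f :: rest => if removed < half then loopB rest (removed + f) (ans + 1) half else ans

def minSetSizeBetter_alt (arr : List Int) : Int :=
  let cnt := PySem.Dict.counter arr
  let freqs := PySem.List.sorted cnt.values (fun x => x) true
  loopB freqs 0 0 (PySem.Int.floordiv (arr.length : Int) 2)

-- ===== PRECONDITION & SPEC =====
def Spec_minSetSizeBetter (arr : List Int) (out : Int) : Prop := out = minSetSizeBetter_alt arr
instance (arr : List Int) (out : Int) : Decidable (Spec_minSetSizeBetter arr out) := by unfold Spec_minSetSizeBetter; infer_instance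

-- ===== CLAIM (what is proved, stated in full; the proofs are below) =====
def Claim_equal_minSetSizeBetter : Prop := ∀ (arr : List Int), Dom_minSetSizeBetter arr → Spec_minSetSizeBetter arr (minSetSizeBetter arr)

-- ===== LEMMAS AND PROOFS =====

-- the multiset left in the counting array at indices 1..freq, listed descending
def descList (c : List Int) : Nat → List Int
  | 0 => []
  | f + 1 => List.replicate ((c.getD (f + 1) 0).toNat) (((f + 1 : Nat)) : Int) ++ descList c f

lemma getD_oob {c : List Int} {i : Nat} (h : c.length ≤ i) : c.getD i 0 = 0 := by
  simp [List.getD_eq_getElem?_getD, List.getElem?_eq_none h]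

lemma getD_set_self {c : List Int} {i : Nat} (h : i < c.length) (v : Int) :
    (c.set i v).getD i 0 = v := by
  simp [List.getD_eq_getElem?_getD, h]

lemma getD_set_ne {c : List Int} {i j : Nat} (h : i ≠ j) (v : Int) :
    (c.set i v).getD j 0 = c.getD j 0 := by
  simp [List.getD_eq_getElem?_getD, List.getElem?_set_ne h]

lemma descList_set_gt {j : Nat} (v : Int) :
    ∀ (m : Nat) (c : List Int), m < j → descList (c.set j v) m = descList c m := by
  intro m
  induction m with
  | zero => intro c _; rfl
  | succ f ih =>
    intro c hm
    simp only [descList]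
    rw [getD_set_ne (by omega), ih c (by omega)]

lemma descList_mem {c : List Int} :
    ∀ (freq : Nat) (x : Int), x ∈ descList c freq → 1 ≤ x ∧ x ≤ (freq : Int) := by
  intro freq
  induction freq with
  | zero => intro x hx; simp [descList] at hx
  | succ f ih =>
    intro x hx
    simp only [descList, List.mem_append, List.mem_replicate] at hx
    rcases hx with ⟨_, rfl⟩ | hx
    · constructor <;> omega
    · have := ih x hx; constructor <;> omega

lemma descList_sorted (c : List Int) :
    ∀ freq : Nat, (descList c freq).Pairwise (fun a b => b ≤ a) := by
  intro freq
  induction freq with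
  | zero => simp [descList]
  | succ f ih =>
    simp only [descList]
    refine List.pairwise_append.2 ⟨List.pairwise_replicate.2 (Or.inr (le_refl _)), ih, ?_⟩
    intro a ha b hb
    rcases List.mem_replicate.1 ha with ⟨_, rfl⟩
    have := descList_mem f b hb
    omega

lemma descList_cons {c : List Int} (hpos : ∀ i : Nat, 0 ≤ c.getD i 0) :
    ∀ (freq : Nat) (f : Int) (rest : List Int), descList c freq = f :: rest →
      1 ≤ f ∧ ((findIdxA c freq : Nat) : Int) = f ∧ 1 ≤ c.getD f.toNat 0 ∧
      descList (c.set f.toNat (c.getD f.toNat 0 - 1)) f.toNat = rest ∧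
      (∀ i : Nat, f.toNat < i → i ≤ freq → c.getD i 0 = 0) := by
  intro freq
  induction freq with
  | zero => intro f rest h; simp [descList] at h
  | succ fr ih =>
    intro f rest h
    simp only [descList] at h
    by_cases hk : (c.getD (fr + 1) 0).toNat = 0
    · rw [hk] at h
      simp only [List.replicate_zero, List.nil_append] at h
      obtain ⟨h1, h2, h3, h4, h5⟩ := ih f rest h
      refine ⟨h1, ?_, h3, h4, ?_⟩
      · simp only [findIdxA, PySem.List.pyGetD_natCast]
        rw [if_pos (by have := hpos (fr + 1); omega)]
        exact h2
      · intro i hi1 hi2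
        rcases Nat.lt_or_ge i (fr + 1) with h' | h'
        · exact h5 i hi1 (by omega)
        · have := hpos i
          have hi : i = fr + 1 := by omega
          rw [hi] at this ⊢
          omega
    · have hg := hpos (fr + 1)
      have hk1 : 1 ≤ c.getD (fr + 1) 0 := by omega
      obtain ⟨k, hkk⟩ : ∃ k, (c.getD (fr + 1) 0).toNat = k + 1 :=
        ⟨(c.getD (fr + 1) 0).toNat - 1, by omega⟩
      rw [hkk] at h
      simp only [List.replicate_succ, List.cons_append] at h
      injection h with hf hrest
      subst hf
      have htn : ((((fr + 1 : Nat)) : Int)).toNat = fr + 1 := Int.toNat_natCast _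
      have hlen : fr + 1 < c.length := by
        by_contra hc
        have := getD_oob (c := c) (i := fr + 1) (by omega)
        omega
      refine ⟨by omega, ?_, ?_, ?_, ?_⟩
      · simp only [findIdxA, PySem.List.pyGetD_natCast]
        rw [if_neg (by omega)]
      · rw [htn]; exact hk1
      · rw [htn]
        simp only [descList]
        rw [getD_set_self hlen, descList_set_gt _ fr c (by omega)]
        have hrepl : (c.getD (fr + 1) 0 - 1).toNat = k := by omega
        rw [hrepl, ← hrest]
      · intro i hi1 hi2
        rw [htn] at hi1
        omega

lemma descList_count {c : List Int} :
    ∀ (freq : Nat) (x : Int),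
      (descList c freq).count x = if 1 ≤ x ∧ x.toNat ≤ freq then (c.getD x.toNat 0).toNat else 0 := by
  intro freq
  induction freq with
  | zero =>
    intro x
    simp only [descList, List.count_nil]
    rw [if_neg (by omega)]
  | succ fr ih =>
    intro x
    simp only [descList, List.count_append, List.count_replicate]
    rw [ih]
    by_cases hx : x = ((fr + 1 : Nat) : Int)
    · subst hx
      simp only [beq_iff_eq, Int.toNat_natCast]
      rw [if_pos trivial, if_neg (by omega), if_pos (by omega)]
      omega
    · simp only [beq_iff_eq]
      rw [if_neg (fun h => hx h.symm)]
      split_ifs <;> omega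

lemma loopA_eq_loopB :
    ∀ (fuel : Nat) (c : List Int) (freq : Nat) (removed ans half : Int),
      (∀ i : Nat, 0 ≤ c.getD i 0) →
      c.getD 0 0 = 0 →
      (∀ i : Nat, freq < i → c.getD i 0 = 0) →
      half ≤ (descList c freq).sum + removed →
      (descList c freq).length ≤ fuel →
      loopA c ans removed half freq fuel = loopB (descList c freq) removed ans half := by
  intro fuel
  induction fuel with
  | zero =>
    intro c freq removed ans half hpos h0 hhigh hsum hlen
    have hnil : descList c freq = [] := List.eq_nil_of_length_eq_zero (by omega)
    rw [hnil]
    simp only [loopA, loopB]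
  | succ fuel ih =>
    intro c freq removed ans half hpos h0 hhigh hsum hlen
    by_cases hr : removed < half
    · cases hL : descList c freq with
      | nil =>
        rw [hL] at hsum
        simp only [List.sum_nil, zero_add] at hsum
        omega
      | cons f rest =>
        obtain ⟨hf1, hfind, hgd, hrest, hzero⟩ := descList_cons hpos freq f rest hL
        set g := findIdxA c freq with hgdef
        have hfg : f.toNat = g := by omega
        have hg1 : 1 ≤ g := by omega
        rw [hfg] at hrest hgd
        have hglen : g < c.length := by
          by_contra hc
          have := getD_oob (c := c) (i := g) (by omega)
          omega
        have hpos' : ∀ i : Nat, 0 ≤ (c.set g (c.getD g 0 - 1)).getD i 0 := by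
          intro i
          by_cases hi : i = g
          · subst hi; rw [getD_set_self hglen]; omega
          · rw [getD_set_ne (fun h => hi h.symm)]; exact hpos i
        have h0' : (c.set g (c.getD g 0 - 1)).getD 0 0 = 0 := by
          rw [getD_set_ne (by omega)]; exact h0
        have hhigh' : ∀ i : Nat, g < i → (c.set g (c.getD g 0 - 1)).getD i 0 = 0 := by
          intro i hi
          rw [getD_set_ne (by omega)]
          rcases Nat.lt_or_ge freq i with h' | h'
          · exact hhigh i h'
          · exact hzero i (by omega) h'
        have hsum' : half ≤ (descList (c.set g (c.getD g 0 - 1)) g).sum + (removed + (g : Int)) := by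
          rw [hrest]
          rw [hL] at hsum
          simp only [List.sum_cons] at hsum
          omega
        have hlen' : (descList (c.set g (c.getD g 0 - 1)) g).length ≤ fuel := by
          rw [hrest]
          rw [hL] at hlen
          simp only [List.length_cons] at hlen
          omega
        simp only [loopA, if_pos hr, PySem.List.pySetD_natCast, PySem.List.pyGetD_natCast]
        rw [ih _ g _ _ _ hpos' h0' hhigh' hsum' hlen', hrest]
        simp only [loopB, if_pos hr, hfind]
    · simp only [loopA, if_neg hr]
      cases hL : descList c freq with
      | nil => simp only [loopB]
      | cons f rest => simp only [loopB, if_neg hr]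

-- the counting-array build loop, read back entrywise
lemma build_getD :
    ∀ (vs : List Int) (c0 : List Int), (∀ v ∈ vs, 1 ≤ v ∧ v.toNat < c0.length) →
      ∀ i : Nat,
        (vs.foldl (fun c freq => PySem.List.pySetD c freq (PySem.List.pyGetD c freq 0 + 1)) c0).getD i 0
          = c0.getD i 0 + (vs.count (i : Int) : Int) := by
  intro vs
  induction vs with
  | nil => intro c0 _ i; simp
  | cons v rest ih =>
    intro c0 h i
    obtain ⟨hv1, hvlen⟩ := h v (by simp)
    simp only [List.foldl_cons]
    rw [PySem.List.pySetD_of_nonneg _ _ (by omega),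
        PySem.List.pyGetD_eq_getElem _ _ (by omega) (by omega),
        show c0[v.toNat] = c0.getD v.toNat 0 from (List.getD_eq_getElem c0 0 hvlen).symm,
        ih _ (by
          intro w hw
          obtain ⟨w1, wlen⟩ := h w (List.mem_cons_of_mem _ hw)
          exact ⟨w1, by simpa [List.length_set] using wlen⟩) i]
    simp only [List.count_cons, beq_iff_eq]
    by_cases hi : i = v.toNat
    · subst hi
      rw [getD_set_self hvlen, if_pos (by omega)]
      push_cast
      omega
    · rw [getD_set_ne (fun hh => hi hh.symm), if_neg (by omega)]
      push_cast
      omega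

lemma build_length :
    ∀ (vs : List Int) (c0 : List Int),
      (vs.foldl (fun c freq => PySem.List.pySetD c freq (PySem.List.pyGetD c freq 0 + 1)) c0).length
        = c0.length := by
  intro vs
  induction vs with
  | nil => intro c0; rfl
  | cons v rest ih =>
    intro c0
    simp only [List.foldl_cons]
    rw [ih, PySem.List.length_pySetD]

lemma values_counter (arr : List Int) :
    (PySem.Dict.counter arr).values = (PySem.Set.ofList arr).map (fun k => (arr.count k : Int)) := by
  unfold PySem.Dict.values
  rw [PySem.Dict.items_counter, List.map_map]
  rfl

lemma desc_eq_sorted {L vs : List Int} (hperm : L.Perm vs)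
    (hsorted : L.Pairwise (fun a b => b ≤ a)) :
    L = PySem.List.sorted vs (fun x => x) true := by
  refine List.Perm.eq_of_pairwise (fun a b _ _ h1 h2 => le_antisymm h2 h1)
    hsorted (PySem.List.sorted_pairwise_rev vs (fun x => x))
    (hperm.trans (PySem.List.sorted_perm vs (fun x => x) true).symm)

-- ===== VERDICT (by name: the statement is the Claim_ definition above) =====
theorem minSetSizeBetter_spec : Claim_equal_minSetSizeBetter := by
  intro arr _
  unfold Spec_minSetSizeBetter
  simp only [minSetSizeBetter, minSetSizeBetter_alt]
  set vs := (PySem.Dict.counter arr).values with hvs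
  set n := arr.length with hn
  set counting := vs.foldl
    (fun c freq => PySem.List.pySetD c freq (PySem.List.pyGetD c freq 0 + 1))
    (List.replicate (n + 1) (0 : Int)) with hc
  have hval : vs = (PySem.Set.ofList arr).map (fun k => (arr.count k : Int)) := values_counter arr
  have hmem : ∀ v ∈ vs, 1 ≤ v ∧ v ≤ (n : Int) := by
    intro v hv
    rw [hval] at hv
    obtain ⟨k, hk, rfl⟩ := List.mem_map.1 hv
    have hk' : k ∈ arr := (PySem.Set.mem_ofList arr k).1 hk
    have h1 : 0 < arr.count k := List.count_pos_iff.2 hk'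
    have h2 : arr.count k ≤ n := List.count_le_length
    omega
  have hb : ∀ v ∈ vs, 1 ≤ v ∧ v.toNat < (List.replicate (n + 1) (0 : Int)).length := by
    intro v hv
    obtain ⟨h1, h2⟩ := hmem v hv
    simp only [List.length_replicate]
    omega
  have hCget : ∀ i : Nat, counting.getD i 0 = ((vs.count ((i : Nat) : Int) : Nat) : Int) := by
    intro i
    rw [hc, build_getD vs _ hb i]
    have hz : (List.replicate (n + 1) (0 : Int)).getD i 0 = 0 := by
      simp only [List.getD_eq_getElem?_getD, List.getElem?_replicate]
      split <;> rfl
    rw [hz, zero_add]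
  have hpos : ∀ i : Nat, 0 ≤ counting.getD i 0 := fun i => by
    rw [hCget i]; exact Int.natCast_nonneg _
  have h0 : counting.getD 0 0 = 0 := by
    rw [hCget 0]
    have hnm : (0 : Int) ∉ vs := fun h => by have := hmem _ h; omega
    simp [List.count_eq_zero.2 hnm]
  have hClen : counting.length = n + 1 := by
    rw [hc, build_length]; simp
  have hhigh : ∀ i : Nat, n < i → counting.getD i 0 = 0 := fun i hi => getD_oob (by omega)
  have hcount : ∀ x : Int, (descList counting n).count x = vs.count x := by
    intro x
    rw [descList_count n x]
    split_ifs with h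
    · obtain ⟨h1, h2⟩ := h
      rw [hCget x.toNat]
      have hx : ((x.toNat : Nat) : Int) = x := by omega
      rw [hx, Int.toNat_natCast]
    · refine (List.count_eq_zero.2 ?_).symm
      intro hx
      have := hmem x hx
      omega
  have hperm : (descList counting n).Perm vs := List.perm_iff_count.2 hcount
  have hsorted : descList counting n = PySem.List.sorted vs (fun x => x) true :=
    desc_eq_sorted hperm (descList_sorted counting n)
  have hvsum : vs.sum = (n : Int) := by
    rw [hval]
    have hp : (PySem.Set.ofList arr).Perm arr.dedup :=
      (List.perm_ext_iff_of_nodup (PySem.Set.nodup_ofList arr) arr.nodup_dedup).2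
        (fun a => by rw [PySem.Set.mem_ofList, List.mem_dedup])
    rw [(hp.map (fun k => (arr.count k : Int))).sum_eq]
    rw [show (arr.dedup.map fun k => ((arr.count k : Nat) : Int)).sum
          = (((arr.dedup.map fun k => arr.count k).sum : Nat) : Int) by
        rw [Nat.cast_list_sum, List.map_map]; rfl]
    rw [List.sum_map_count_dedup_eq_length arr]
  have hsum' : PySem.Int.floordiv (n : Int) 2 ≤ (descList counting n).sum + 0 := by
    rw [hperm.sum_eq, hvsum, PySem.Int.floordiv_eq_ediv_of_pos (by omega)]
    omega
  have hlen' : (descList counting n).length ≤ n + 1 := by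
    rw [hperm.length_eq]
    have hv : vs.length ≤ n := by
      rw [hval, List.length_map]
      exact PySem.Set.length_ofList_le arr
    omega
  rw [loopA_eq_loopB (n + 1) counting n 0 0 _ hpos h0 hhigh hsum' hlen', hsorted]
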